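-- pv_equiv track=rewrite | github.com/karelplanken/fcc-coding-challenges | challenges/146_left_handed_seat_at_the_table.py | find_left_handed_seats
-- ===== SOURCE A (Python) =====
-- def find_left_handed_seats(table: list[list[str]]) -> int:
--     top_row, bottom_row = table
--     count = 0
--
--     # Top row: faces down, left is at i-1
--     for i, seat in enumerate(top_row):
--         if seat == 'U' and (i == len(top_row) - 1 or top_row[i + 1] != 'R'):
--             count += 1
--
--     # Bottom row: faces up, left is at i+1
--     for i, seat in enumerate(bottom_row):
--         if seat == 'U' and (i == 0 or bottom_row[i - 1] != 'R'):
--             count += 1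
--
--     return count
-- ===== SOURCE B (Python) =====
-- def find_left_handed_seats(table: list[list[str]]) -> int:
--     top_row, bottom_row = table
--     top = sum(1 for s in top_row if s == 'U') \
--         - sum(1 for a, b in zip(top_row, top_row[1:]) if a == 'U' and b == 'R')
--     bottom = sum(1 for s in bottom_row if s == 'U') \
--         - sum(1 for a, b in zip(bottom_row, bottom_row[1:]) if a == 'R' and b == 'U')
--     return top + bottom
-- ===== Notes on version B (the rewrite author's own statement) =====
-- stated objective: alternative
-- what changed: Replaces A's boundary-indexed single scan of each row (enumerate with i==len-1 / i==0 edge tests and neighbour lookups) by a total-minus-blocked aggregation: count 'U' seats per row and subtract the adjacent-pair occlusions found by zipping each row with its shifted self.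
import Mathlib
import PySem

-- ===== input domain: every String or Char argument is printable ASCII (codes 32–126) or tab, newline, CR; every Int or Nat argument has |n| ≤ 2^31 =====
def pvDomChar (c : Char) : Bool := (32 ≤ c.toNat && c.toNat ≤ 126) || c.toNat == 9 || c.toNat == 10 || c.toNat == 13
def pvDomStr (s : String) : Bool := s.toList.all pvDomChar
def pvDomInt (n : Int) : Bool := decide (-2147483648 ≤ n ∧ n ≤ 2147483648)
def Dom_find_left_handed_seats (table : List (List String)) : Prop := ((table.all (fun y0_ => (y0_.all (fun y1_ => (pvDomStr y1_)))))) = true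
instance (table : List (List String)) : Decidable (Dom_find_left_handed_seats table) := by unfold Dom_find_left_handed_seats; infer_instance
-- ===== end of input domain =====

-- B counts left-handed seats per row as (total 'U') minus (occluded adjacent pairs via zip)
-- instead of A's index-boundary scan; equivalent, no speed claim. Pre_ excludes tables whose
-- length is not exactly 2, on which both Pythons raise ValueError while unpacking.


-- ===== PORT A =====
-- literal transliteration of A: two enumerate loops with boundary tests and neighbour lookups
def find_left_handed_seats (table : List (List String)) : Int :=
  match table with
  | [top_row, bottom_row] =>
    -- Top row: faces down, left is at i-1
    let count := (PySem.List.enumerate top_row 0).foldl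
      (fun count p =>
        if p.2 = "U" ∧ (p.1 = (top_row.length : Int) - 1 ∨
            PySem.List.pyGetD top_row (p.1 + 1) "" ≠ "R")
        then count + 1 else count) 0
    -- Bottom row: faces up, left is at i+1
    (PySem.List.enumerate bottom_row 0).foldl
      (fun count p =>
        if p.2 = "U" ∧ (p.1 = 0 ∨
            PySem.List.pyGetD bottom_row (p.1 - 1) "" ≠ "R")
        then count + 1 else count) count
  | _ => 0  -- unreachable under Pre_ (Python raises ValueError while unpacking)

-- ===== PORT B =====
-- transliteration of Source B: per row, count of 'U' minus count of occluding adjacent pairs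
def find_left_handed_seats_alt (table : List (List String)) : Int :=
  if h : table.length = 2 then
    let top_row := table[0]'(by omega)
    let bottom_row := table[1]'(by omega)
    let top : Int :=
      (top_row.foldl (fun c s => if s = "U" then c + 1 else c) 0)
      - ((top_row.zip (PySem.List.slice top_row (some 1) none)).foldl
          (fun c p => if p.1 = "U" ∧ p.2 = "R" then c + 1 else c) 0)
    let bottom : Int :=
      (bottom_row.foldl (fun c s => if s = "U" then c + 1 else c) 0)
      - ((bottom_row.zip (PySem.List.slice bottom_row (some 1) none)).foldl
          (fun c p => if p.1 = "R" ∧ p.2 = "U" then c + 1 else c) 0)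
    top + bottom
  else 0  -- unreachable under Pre_

-- ===== PRECONDITION & SPEC =====
-- Pre_ excludes exactly the tables of length ≠ 2: there 'top_row, bottom_row = table' raises ValueError.
def Pre_find_left_handed_seats (table : List (List String)) : Prop := table.length = 2
instance (table : List (List String)) : Decidable (Pre_find_left_handed_seats table) := by
  unfold Pre_find_left_handed_seats; infer_instance

def pvWitness_find_left_handed_seats : List (List String) := [["U", "R", "U"], ["R", "U", "U"]]

def Spec_find_left_handed_seats (table : List (List String)) (out : Int) : Prop := out = find_left_handed_seats_alt table
instance (table : List (List String)) (out : Int) : Decidable (Spec_find_left_handed_seats table out) := by unfold Spec_find_left_handed_seats; infer_instance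

-- ===== CLAIM (what is proved, stated in full; the proofs are below) =====
def Claim_equal_find_left_handed_seats : Prop := ∀ (table : List (List String)), Dom_find_left_handed_seats table → Pre_find_left_handed_seats table → Spec_find_left_handed_seats table (find_left_handed_seats table)

-- ===== LEMMAS AND PROOFS =====

-- recursive characterisation of the top-row count: seat counts iff 'U' and next seat (if any) ≠ 'R'
def gTop : List String → Int
  | [] => 0
  | s :: rest =>
    (if s = "U" ∧ (rest = [] ∨ rest.head? ≠ some "R") then 1 else 0) + gTop rest

-- recursive characterisation of the bottom-row count past position 0, carrying the previous seat
def gBot : String → List String → Int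
  | _, [] => 0
  | prev, s :: rest => (if s = "U" ∧ prev ≠ "R" then 1 else 0) + gBot s rest

lemma drop_getD (full : List String) (k : Nat) (x : String) (t : List String)
    (h : full.drop k = x :: t) : full.getD k "" = x := by
  have h0 : (full.drop k)[0]? = some x := by rw [h]; rfl
  rw [List.getElem?_drop] at h0
  simp only [Nat.add_zero] at h0
  simp [List.getD_eq_getElem?_getD, h0]

lemma topBridge (full : List String) :
    ∀ (t : List String) (k : Nat) (c : Int), full.drop k = t →
      (PySem.List.enumerate t (k : Int)).foldl
        (fun count p =>
          if p.2 = "U" ∧ ((p.1 : Int) = (full.length : Int) - 1 ∨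
              PySem.List.pyGetD full (p.1 + 1) "" ≠ "R")
          then count + 1 else count) c = c + gTop t := by
  intro t
  induction t with
  | nil => intro k c h; simp [PySem.List.enumerate, gTop]
  | cons s rest ih =>
    intro k c h
    have hlen : full.length = k + 1 + rest.length := by
      have := congrArg List.length h
      simp at this
      omega
    have hdrop : full.drop (k + 1) = rest := by
      rw [← List.drop_drop, h]; rfl
    rw [PySem.List.enumerate_cons]
    simp only [List.foldl_cons]
    have hcast : ((k : Int) + 1) = ((k + 1 : Nat) : Int) := by push_cast; ring
    rw [hcast, ih (k + 1) _ hdrop]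
    -- identify the step condition with gTop's head condition
    have hcond : ((k : Int) = (full.length : Int) - 1 ∨
        PySem.List.pyGetD full ((k : Int) + 1) "" ≠ "R")
        ↔ (rest = [] ∨ rest.head? ≠ some "R") := by
      cases rest with
      | nil =>
        simp only [List.length_nil] at hlen
        constructor
        · intro _; exact Or.inl rfl
        · intro _; left; omega
      | cons y r =>
        simp only [List.length_cons] at hlen
        have hy : full.getD (k + 1) "" = y := drop_getD full (k + 1) y r hdrop
        have hget : PySem.List.pyGetD full ((k : Int) + 1) "" = y := by
          rw [hcast, PySem.List.pyGetD_natCast, hy]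
        constructor
        · intro hor
          cases hor with
          | inl heq => exfalso; omega
          | inr hne => right; rw [hget] at hne; simp [hne]
        · intro hor
          cases hor with
          | inl habs => exact absurd habs (by simp)
          | inr hne => right; rw [hget]; simpa using hne
    by_cases hU : s = "U"
    · by_cases hn : (rest = [] ∨ rest.head? ≠ some "R")
      · rw [if_pos ⟨hU, hcond.mpr hn⟩]
        rw [gTop, if_pos ⟨hU, hn⟩]; ring
      · rw [if_neg (fun hc => hn (hcond.mp hc.2))]
        rw [gTop, if_neg (fun hc => hn hc.2)]; ring
    · rw [if_neg (fun hc => hU hc.1), gTop, if_neg (fun hc => hU hc.1)]; ring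

lemma botBridge (full : List String) :
    ∀ (t : List String) (prev : String) (k : Nat) (c : Int), full.drop k = prev :: t →
      (PySem.List.enumerate t ((k : Int) + 1)).foldl
        (fun count p =>
          if p.2 = "U" ∧ ((p.1 : Int) = 0 ∨
              PySem.List.pyGetD full (p.1 - 1) "" ≠ "R")
          then count + 1 else count) c = c + gBot prev t := by
  intro t
  induction t with
  | nil => intro prev k c h; simp [PySem.List.enumerate, gBot]
  | cons s rest ih =>
    intro prev k c h
    have hdrop : full.drop (k + 1) = s :: rest := by
      rw [← List.drop_drop, h]; rfl
    rw [PySem.List.enumerate_cons]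
    simp only [List.foldl_cons]
    have hcast : ((k : Int) + 1 + 1) = ((k + 1 : Nat) : Int) + 1 := by push_cast; ring
    rw [hcast, ih s (k + 1) _ hdrop]
    have hprev : full.getD k "" = prev := drop_getD full k prev (s :: rest) h
    have hget : PySem.List.pyGetD full ((k : Int) + 1 - 1) "" = prev := by
      have : ((k : Int) + 1 - 1) = ((k : Nat) : Int) := by ring
      rw [this, PySem.List.pyGetD_natCast, hprev]
    have hcond : (((k : Int) + 1) = 0 ∨
        PySem.List.pyGetD full ((k : Int) + 1 - 1) "" ≠ "R") ↔ prev ≠ "R" := by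
      constructor
      · intro hor
        cases hor with
        | inl heq => exfalso; omega
        | inr hne => rw [hget] at hne; exact hne
      · intro hne; right; rw [hget]; exact hne
    by_cases hU : s = "U"
    · by_cases hp : prev ≠ "R"
      · rw [if_pos ⟨hU, hcond.mpr hp⟩, gBot, if_pos ⟨hU, hp⟩]; ring
      · rw [if_neg (fun hc => hp (hcond.mp hc.2)), gBot, if_neg (fun hc => hp hc.2)]; ring
    · rw [if_neg (fun hc => hU hc.1), gBot, if_neg (fun hc => hU hc.1)]; ring

-- accumulator extraction for a counting foldl
lemma count_acc {α : Type} (P : α → Prop) [DecidablePred P] :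
    ∀ (l : List α) (c : Int),
      l.foldl (fun c x => if P x then c + 1 else c) c
        = c + l.foldl (fun c x => if P x then c + 1 else c) 0 := by
  intro l
  induction l with
  | nil => intro c; simp
  | cons x t ih =>
    intro c
    simp only [List.foldl_cons]
    rw [ih, ih (if P x then 0 + 1 else 0)]
    split_ifs <;> ring

-- B's top-row aggregation equals the recursive characterisation
lemma topAlt_eq : ∀ (l : List String),
    (l.foldl (fun c s => if s = "U" then c + 1 else c) 0)
      - ((l.zip l.tail).foldl (fun c p => if p.1 = "U" ∧ p.2 = "R" then c + 1 else c) 0)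
    = gTop l := by
  intro l
  induction l with
  | nil => simp [gTop]
  | cons s rest ih =>
    cases rest with
    | nil => by_cases hU : s = "U" <;> simp [gTop, hU]
    | cons y r =>
      have hrest := ih
      simp only [List.tail_cons, List.zip_cons_cons, List.foldl_cons] at hrest ⊢
      rw [count_acc (fun s => s = "U"), count_acc (fun p : String × String => p.1 = "U" ∧ p.2 = "R")]
      rw [count_acc (fun s => s = "U"), count_acc (fun p : String × String => p.1 = "U" ∧ p.2 = "R")] at hrest
      rw [gTop]
      simp only [List.head?_cons]
      split_ifs at hrest ⊢ <;> first | omega | simp_all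

-- B's bottom-row aggregation equals [head = 'U'] + the recursive characterisation
lemma botAlt_eq : ∀ (t : List String) (x : String),
    ((x :: t).foldl (fun c s => if s = "U" then c + 1 else c) 0)
      - (((x :: t).zip t).foldl (fun c p => if p.1 = "R" ∧ p.2 = "U" then c + 1 else c) 0)
    = (if x = "U" then 1 else 0) + gBot x t := by
  intro t
  induction t with
  | nil => intro x; by_cases hU : x = "U" <;> simp [gBot, hU]
  | cons s rest ih =>
    intro x
    have hr := ih s
    simp only [List.zip_cons_cons, List.foldl_cons] at hr ⊢
    rw [count_acc (fun s => s = "U"), count_acc (fun p : String × String => p.1 = "R" ∧ p.2 = "U")]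
    rw [count_acc (fun s => s = "U"), count_acc (fun p : String × String => p.1 = "R" ∧ p.2 = "U")] at hr
    rw [gBot]
    split_ifs at hr ⊢ <;> first | omega | simp_all

-- ===== VERDICT (by name: the statement is the Claim_ definition above) =====
theorem find_left_handed_seats_spec : Claim_equal_find_left_handed_seats := by
  intro table _ hpre
  unfold Pre_find_left_handed_seats at hpre
  match table, hpre with
  | [top_row, bottom_row], _ =>
    unfold Spec_find_left_handed_seats find_left_handed_seats find_left_handed_seats_alt
    simp only
    rw [dif_pos (show ([top_row, bottom_row] : List (List String)).length = 2 from rfl)]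
    simp only [List.getElem_cons_zero, List.getElem_cons_succ]
    rw [PySem.List.slice_from_one, PySem.List.slice_from_one]
    -- top row
    have htop := topBridge top_row top_row 0 0 (by simp)
    simp only [Nat.cast_zero, zero_add] at htop
    rw [htop, topAlt_eq]
    -- bottom row
    cases bottom_row with
    | nil => simp [PySem.List.enumerate]
    | cons x t =>
      rw [PySem.List.enumerate_cons, List.foldl_cons]
      have hbot := fun c => botBridge (x :: t) t x 0 c (by simp)
      simp only [Nat.cast_zero, zero_add] at hbot
      simp only [zero_add]
      rw [hbot]
      have halt := botAlt_eq t x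
      simp only [List.tail_cons]
      rw [halt]
      by_cases hU : x = "U"
      · simp [hU]; ring
      · simp [hU]
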